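-- pv_equiv track=rewrite | github.com/dartsim/dart | scripts/sync_ai_commands.py | strip_auto_gen_header
-- ===== SOURCE A (Python) =====
-- def strip_auto_gen_header(content: str) -> str:
--     """Remove auto-generated header from content for comparison."""
--     lines = content.split("\n")
--     result_lines = []
--     in_header = False
--
--     for line in lines:
--         if line.startswith("<!-- AUTO-GENERATED FILE"):
--             in_header = True
--             continue
--         if in_header:
--             if line.startswith("<!--"):
--                 continue
--             in_header = False
--         result_lines.append(line)
--
--     return "\n".join(result_lines)
-- ===== SOURCE B (Python) =====
-- def strip_auto_gen_header(content: str) -> str: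
--     """Remove auto-generated header from content for comparison."""
--     MARK = "<!-- AUTO-GENERATED FILE"
--     s = content
--     pos = 0
--     while True:
--         p = s.find(MARK, pos)
--         if p == -1:
--             return s
--         if p > 0 and s[p - 1] != "\n":
--             pos = p + 1
--             continue
--         # extend the block over the run of comment lines that follows
--         e = s.find("\n", p)
--         while e != -1 and s.startswith("<!--", e + 1):
--             e = s.find("\n", e + 1)
--         if e == -1:
--             # block reaches end of string: also drop the newline before it
--             s = s[: max(p - 1, 0)]
--         else:
--             # drop the block together with its trailing newline
--             s = s[:p] + s[e + 1:]
--         pos = p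
-- ===== Notes on version B (the rewrite author's own statement) =====
-- stated objective: alternative
-- what changed: A splits the text into lines and re-joins them while threading an in_header flag; B never splits: it scans the raw string with find for the marker at a line start, extends the block over the following <!-- lines by repeated find of newlines, and splices the block plus one adjacent newline out of the string.
import Mathlib
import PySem

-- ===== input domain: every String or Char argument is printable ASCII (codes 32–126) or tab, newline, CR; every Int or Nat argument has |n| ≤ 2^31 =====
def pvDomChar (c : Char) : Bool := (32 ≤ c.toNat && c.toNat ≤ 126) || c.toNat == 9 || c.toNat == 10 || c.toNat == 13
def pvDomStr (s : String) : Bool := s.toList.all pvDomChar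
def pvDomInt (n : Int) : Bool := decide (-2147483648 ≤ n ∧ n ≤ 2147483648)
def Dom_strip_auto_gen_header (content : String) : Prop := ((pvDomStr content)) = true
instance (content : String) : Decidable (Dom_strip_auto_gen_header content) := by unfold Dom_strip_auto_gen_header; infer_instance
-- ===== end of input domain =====

-- B replaces A's split-into-lines state machine by raw string surgery (find the marker at a
-- line start, extend over the comment run, splice it out) — an alternative algorithm, same cost.

-- ===== PORT A =====
-- one step of A's loop: state = (result_lines, in_header)
def aStep (st : List String × Bool) (line : String) : List String × Bool :=
  if PySem.Str.startswith line "<!-- AUTO-GENERATED FILE" then (st.1, true)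
  else if st.2 then
    (if PySem.Str.startswith line "<!--" then st else (st.1 ++ [line], false))
  else (st.1 ++ [line], false)

def strip_auto_gen_header (content : String) : String :=
  let lines := ((PySem.Chars.splitOn content.toList "\n".toList).map String.ofList)
  PySem.Str.join "\n" ((lines.foldl aStep ([], false)).1)

-- ===== PORT B =====
def markC : List Char := "<!-- AUTO-GENERATED FILE".toList
def cmtC : List Char := "<!--".toList
def nlC : List Char := "\n".toList

-- inner `while e != -1 and s.startswith("<!--", e + 1)` loop of Source B
-- (fuel only makes the recursion structural; `s.length + 1` always suffices — proved below).
-- `s.startswith("<!--", e + 1)` is ported as startswith on the slice `s[e+1:]` — exact, since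
-- Python's startswith-with-start reads its start argument with slice semantics.
def bExtend (s : List Char) : Nat → Int → Int
  | 0, e => e
  | fuel + 1, e =>
    if e ≠ -1 ∧ PySem.Chars.startswith (PySem.List.slice s (some (e + 1)) none) cmtC then
      bExtend s fuel (PySem.Chars.findFrom s nlC (e + 1) none)
    else e

-- outer `while True` loop of Source B; `s[p - 1]` is ported total with pyGetD (the guard `0 < p`
-- together with p being a find result keeps Python's s[p-1] in range wherever it is evaluated).
def bLoop (s : List Char) : Nat → Int → List Char
  | 0, _ => s
  | fuel + 1, pos =>
    let p := PySem.Chars.findFrom s markC pos none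
    if p = -1 then s
    else if 0 < p ∧ PySem.List.pyGetD s (p - 1) ' ' ≠ '\n' then
      bLoop s fuel (p + 1)
    else
      let e := bExtend s (s.length + 1) (PySem.Chars.findFrom s nlC p none)
      if e = -1 then bLoop (PySem.List.slice s none (some (max (p - 1) 0))) fuel p
      else bLoop (PySem.List.slice s none (some p) ++ PySem.List.slice s (some (e + 1)) none) fuel p

def strip_auto_gen_header_alt (content : String) : String :=
  String.ofList (bLoop content.toList (content.toList.length + 1) 0)

-- ===== PRECONDITION & SPEC =====
def Spec_strip_auto_gen_header (content : String) (out : String) : Prop := out = strip_auto_gen_header_alt content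
instance (content : String) (out : String) : Decidable (Spec_strip_auto_gen_header content out) := by unfold Spec_strip_auto_gen_header; infer_instance

-- ===== CLAIM (what is proved, stated in full; the proofs are below) =====
def Claim_equal_strip_auto_gen_header : Prop := ∀ (content : String), Dom_strip_auto_gen_header content → Spec_strip_auto_gen_header content (strip_auto_gen_header content)

-- ===== LEMMAS AND PROOFS =====

def linesRec : List Char → List (List Char)
  | [] => [[]]
  | c :: t => if c = '\n' then [] :: linesRec t else (c :: (linesRec t).headD []) :: (linesRec t).tail

lemma linesRec_ne_nil (s : List Char) : linesRec s ≠ [] := by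
  cases s with
  | nil => simp [linesRec]
  | cons c t => simp only [linesRec]; split <;> simp

lemma linesRec_cons_eq (s : List Char) : (linesRec s).headD [] :: (linesRec s).tail = linesRec s := by
  cases h : linesRec s with
  | nil => exact absurd h (linesRec_ne_nil s)
  | cons a l => simp

lemma head_linesRec (s : List Char) : (linesRec s).headD [] = s.takeWhile (· ≠ '\n') := by
  induction s with
  | nil => simp [linesRec]
  | cons c t ih =>
    by_cases hc : c = '\n'
    · subst hc; simp [linesRec, List.takeWhile]
    · have ih' : (linesRec t).head?.getD [] = List.takeWhile (fun x => !decide (x = '\n')) t := by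
        simpa [List.headD_eq_head?_getD, decide_not] using ih
      simp [linesRec, hc, ih']

lemma linesRec_append_nl (a b : List Char) : linesRec (a ++ '\n' :: b) = linesRec a ++ linesRec b := by
  induction a with
  | nil => simp [linesRec]
  | cons c a' ih =>
    by_cases hc : c = '\n'
    · subst hc; simp [linesRec, ih]
    · obtain ⟨y, ys, h⟩ := List.exists_cons_of_ne_nil (linesRec_ne_nil a')
      simp [linesRec, hc, ih, h]

lemma linesRec_of_no_nl {a : List Char} (h : ∀ c ∈ a, c ≠ '\n') : linesRec a = [a] := by
  induction a with
  | nil => simp [linesRec]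
  | cons c t ih =>
    have hc : c ≠ '\n' := h c (by simp)
    rw [show linesRec (c :: t) = if c = '\n' then [] :: linesRec t else (c :: (linesRec t).headD []) :: (linesRec t).tail from rfl,
      if_neg hc, ih (fun x hx => h x (by simp [hx]))]
    simp

lemma mem_linesRec_no_nl {s l : List Char} (h : l ∈ linesRec s) : ∀ c ∈ l, c ≠ '\n' := by
  induction s generalizing l with
  | nil => simp [linesRec] at h; simp [h]
  | cons c t ih =>
    by_cases hc : c = '\n'
    · subst hc
      rw [show linesRec ('\n'::t) = [] :: linesRec t from by simp [linesRec]] at h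
      rcases List.mem_cons.mp h with h | h
      · simp [h]
      · exact ih h
    · simp only [linesRec, if_neg hc, List.mem_cons] at h
      rcases h with h | h
      · subst h
        intro x hx
        rcases List.mem_cons.mp hx with rfl | hx'
        · exact hc
        · exact ih (by rw [← linesRec_cons_eq t]; exact List.mem_cons_self ..) x hx'
      · have : l ∈ linesRec t := by rw [← linesRec_cons_eq t]; exact List.mem_cons_of_mem _ h
        exact ih this

lemma go_eq (fuel : Nat) : ∀ (l cur : List Char) (accs : List (List Char)), l.length < fuel →
    PySem.Chars.splitOn.go nlC fuel l cur accs =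
      accs.reverse ++ (cur.reverse ++ (linesRec l).headD []) :: (linesRec l).tail := by
  induction fuel with
  | zero => intro l cur accs h; omega
  | succ f ih =>
    intro l cur accs h
    cases l with
    | nil => simp [PySem.Chars.splitOn.go, linesRec]
    | cons c rest =>
      by_cases hc : c = '\n'
      · subst hc
        have hpre : nlC.isPrefixOf ('\n' :: rest) = true := by simp [nlC, List.isPrefixOf]
        rw [show PySem.Chars.splitOn.go nlC (f+1) ('\n'::rest) cur accs =
          PySem.Chars.splitOn.go nlC f (List.drop nlC.length ('\n'::rest)) [] (cur.reverse :: accs) from by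
            simp [PySem.Chars.splitOn.go, hpre]]
        rw [show List.drop nlC.length ('\n'::rest) = rest from by simp [nlC]]
        rw [ih rest [] (cur.reverse :: accs) (by simp at h; omega)]
        simp [linesRec]
        simpa [List.headD_eq_head?_getD] using linesRec_cons_eq rest
      · have hpre : nlC.isPrefixOf (c :: rest) = false := by
          simp [nlC, List.isPrefixOf]; exact fun hx => absurd hx.symm hc
        rw [show PySem.Chars.splitOn.go nlC (f+1) (c::rest) cur accs =
          PySem.Chars.splitOn.go nlC f rest (c :: cur) accs from by
            simp [PySem.Chars.splitOn.go, hpre]]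
        rw [ih rest (c :: cur) accs (by simp at h; omega)]
        simp [linesRec, hc]

lemma splitOn_eq_linesRec (s : List Char) : PySem.Chars.splitOn s nlC = linesRec s := by
  rw [show PySem.Chars.splitOn s nlC = PySem.Chars.splitOn.go nlC (s.length + 1) s [] [] from rfl,
    go_eq (s.length + 1) s [] [] (by omega)]
  simpa using linesRec_cons_eq s

lemma join_linesRec (s : List Char) : PySem.Chars.join nlC (linesRec s) = s := by
  induction s with
  | nil =>
    rw [show linesRec ([] : List Char) = [[]] from rfl, PySem.Chars.join_singleton]
  | cons c t ih =>
    obtain ⟨y, ys, hy⟩ := List.exists_cons_of_ne_nil (linesRec_ne_nil t)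
    by_cases hc : c = '\n'
    · subst hc
      rw [show linesRec ('\n'::t) = [] :: linesRec t from by simp [linesRec]]
      rw [hy] at ih ⊢
      simpa [PySem.Chars.join, nlC, List.intercalate] using ih
    · rw [show linesRec (c::t) = (c :: (linesRec t).headD []) :: (linesRec t).tail from by simp [linesRec, hc]]
      rw [hy] at ih ⊢
      cases ys with
      | nil => simpa [PySem.Chars.join, List.intercalate] using ih
      | cons z zs =>
        simp only [List.headD, List.tail]
        rw [PySem.Chars.join_cons_cons]
        rw [PySem.Chars.join_cons_cons] at ih
        rw [← ih]; simp

def hdrAt (s : List Char) (q : Nat) : Prop := markC <+: s.drop q ∧ (q = 0 ∨ s[q-1]? = some '\n')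

lemma prefix_takeWhile_iff {sub x : List Char} (h : ∀ c ∈ sub, c ≠ '\n') :
    sub <+: x ↔ sub <+: x.takeWhile (· ≠ '\n') := by
  constructor
  · intro hp
    induction sub generalizing x with
    | nil => simp
    | cons a sub' ih =>
      cases x with
      | nil => simp at hp
      | cons b x' =>
        obtain ⟨rfl, hp'⟩ := List.cons_prefix_cons.mp hp
        have ha : a ≠ '\n' := h a (by simp)
        rw [show List.takeWhile (· ≠ '\n') (a :: x') = a :: List.takeWhile (· ≠ '\n') x' from by
          simp [ha]]
        exact List.cons_prefix_cons.mpr ⟨rfl, ih (fun c hc => h c (by simp [hc])) hp'⟩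
  · intro hp
    exact hp.trans (List.takeWhile_prefix _)

lemma hdr_of_mem_tail {s l : List Char} (hm : l ∈ (linesRec s).tail) (hp : markC <+: l) :
    ∃ q : Nat, 1 ≤ q ∧ hdrAt s q := by
  induction s generalizing l with
  | nil => simp [linesRec] at hm
  | cons c t ih =>
    by_cases hc : c = '\n'
    · subst hc
      rw [show linesRec ('\n'::t) = [] :: linesRec t from by simp [linesRec]] at hm
      simp only [List.tail] at hm
      rcases (by rw [← linesRec_cons_eq t] at hm; exact List.mem_cons.mp hm :
          l = (linesRec t).headD [] ∨ l ∈ (linesRec t).tail) with h1 | h1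
      · refine ⟨1, le_rfl, ?_, Or.inr (by simp)⟩
        have : l <+: t := by rw [h1, head_linesRec]; exact List.takeWhile_prefix _
        simpa using hp.trans this
      · obtain ⟨q, hq1, hq2, hq3⟩ := ih h1 hp
        refine ⟨q + 1, by omega, by simpa using hq2, Or.inr ?_⟩
        rcases hq3 with h | h
        · omega
        · simpa [show q + 1 - 1 = (q - 1) + 1 from by omega] using h
    · rw [show linesRec (c::t) = (c :: (linesRec t).headD []) :: (linesRec t).tail from by
        simp [linesRec, hc]] at hm
      simp only [List.tail] at hm
      obtain ⟨q, hq1, hq2, hq3⟩ := ih hm hp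
      refine ⟨q + 1, by omega, by simpa using hq2, Or.inr ?_⟩
      rcases hq3 with h | h
      · omega
      · simpa [show q + 1 - 1 = (q - 1) + 1 from by omega] using h

lemma hdr_of_mem {s l : List Char} (hm : l ∈ linesRec s) (hp : markC <+: l) :
    ∃ q : Nat, hdrAt s q := by
  rw [← linesRec_cons_eq s] at hm
  rcases List.mem_cons.mp hm with h | h
  · refine ⟨0, ?_, Or.inl rfl⟩
    have : l <+: s := by rw [h, head_linesRec]; exact List.takeWhile_prefix _
    simpa using hp.trans this
  · obtain ⟨q, _, hq⟩ := hdr_of_mem_tail h hp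
    exact ⟨q, hq⟩

def stripL : Bool → List (List Char) → List (List Char)
  | _, [] => []
  | b, l :: ls =>
    if markC.isPrefixOf l then stripL true ls
    else if b && cmtC.isPrefixOf l then stripL true ls
    else l :: stripL false ls

lemma stripL_id {ls : List (List Char)} (h : ∀ l ∈ ls, ¬ markC <+: l) : stripL false ls = ls := by
  induction ls with
  | nil => rfl
  | cons l ls' ih =>
    have hm : markC.isPrefixOf l = false := by
      rw [Bool.eq_false_iff]
      intro hx
      exact h l (by simp) (List.isPrefixOf_iff_prefix.mp hx)
    simp [stripL, hm, ih (fun x hx => h x (by simp [hx]))]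

lemma stripL_skip_cmts {cs : List (List Char)} (h : ∀ c ∈ cs, cmtC <+: c) (v : List (List Char)) :
    stripL true (cs ++ v) = stripL true v := by
  induction cs with
  | nil => rfl
  | cons c cs' ih =>
    have hc : cmtC.isPrefixOf c = true := List.isPrefixOf_iff_prefix.mpr (h c (by simp))
    by_cases hm : markC.isPrefixOf c
    · simp [stripL, hm, ih (fun x hx => h x (by simp [hx]))]
    · simp [stripL, hm, hc, ih (fun x hx => h x (by simp [hx]))]

lemma cmt_of_mark {l : List Char} (h : markC <+: l) : cmtC <+: l :=
  List.IsPrefix.trans (List.isPrefixOf_iff_prefix.mp (rfl : cmtC.isPrefixOf markC = true)) h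

lemma stripL_block {hdr : List Char} {cs v : List (List Char)}
    (hh : markC <+: hdr) (hcs : ∀ c ∈ cs, cmtC <+: c)
    (hv : v = [] ∨ ∃ w vs, v = w :: vs ∧ ¬ cmtC <+: w) :
    ∀ (u : List (List Char)) (b : Bool), stripL b (u ++ (hdr :: cs) ++ v) = stripL b (u ++ v) := by
  intro u
  induction u with
  | nil =>
    intro b
    have hh' : markC.isPrefixOf hdr = true := List.isPrefixOf_iff_prefix.mpr hh
    simp only [List.nil_append, List.cons_append, stripL, hh', if_pos]
    rw [stripL_skip_cmts hcs v]
    rcases hv with rfl | ⟨w, vs, rfl, hw⟩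
    · rfl
    · have hw' : cmtC.isPrefixOf w = false := by
        rw [Bool.eq_false_iff]; exact fun hx => hw (List.isPrefixOf_iff_prefix.mp hx)
      have hwm : markC.isPrefixOf w = false := by
        rw [Bool.eq_false_iff]
        exact fun hx => hw (cmt_of_mark (List.isPrefixOf_iff_prefix.mp hx))
      simp [stripL, hw', hwm]
  | cons l u' ih =>
    intro b
    simp only [List.cons_append, stripL]
    split
    · exact ih true
    · split
      · exact ih true
      · rw [ih false]

def asem (s : List Char) : List Char := PySem.Chars.join nlC (stripL false (linesRec s))

lemma fold_eq_stripL (ls : List (List Char)) : ∀ (acc : List String) (b : Bool),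
    ((ls.map String.ofList).foldl aStep (acc, b)).1 = acc ++ (stripL b ls).map String.ofList := by
  induction ls with
  | nil => intro acc b; simp [stripL]
  | cons l ls' ih =>
    intro acc b
    have hsw : ∀ p : String, PySem.Str.startswith (String.ofList l) p = p.toList.isPrefixOf l := by
      intro p; simp [PySem.Str.startswith, PySem.Chars.startswith]
    simp only [List.map_cons, List.foldl_cons, aStep, hsw]
    rw [show "<!-- AUTO-GENERATED FILE".toList = markC from rfl,
      show "<!--".toList = cmtC from rfl]
    by_cases hm : markC.isPrefixOf l
    · simp only [hm, if_pos, stripL]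
      exact ih acc true
    · cases b with
      | true =>
        by_cases hc : cmtC.isPrefixOf l
        · simp only [hm, Bool.false_eq_true, if_false, hc, if_pos, stripL]
          simpa [hm, hc] using ih acc true
        · simp only [hm, Bool.false_eq_true, if_false, hc, stripL]
          simpa [hm, hc] using ih (acc ++ [String.ofList l]) false
      | false =>
        simp only [hm, Bool.false_eq_true, if_false, stripL]
        simpa [hm] using ih (acc ++ [String.ofList l]) false

lemma portA_eq_asem (content : String) :
    strip_auto_gen_header content = String.ofList (asem content.toList) := by
  rw [show strip_auto_gen_header content = PySem.Str.join "\n"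
      ((((PySem.Chars.splitOn content.toList nlC).map String.ofList)).foldl aStep ([], false)).1 from rfl]
  rw [splitOn_eq_linesRec, fold_eq_stripL]
  unfold asem
  simp [PySem.Str.join, List.map_map, Function.comp_def, nlC]

lemma find_nl_of_no_nl {a : List Char} (h : ∀ c ∈ a, c ≠ '\n') : PySem.Chars.find a nlC = -1 := by
  rw [PySem.Chars.find_eq_neg_one_iff]
  rintro ⟨u, v, huv⟩
  have : '\n' ∈ a := by rw [← huv]; simp [nlC]
  exact h '\n' this rfl

lemma find_nl_append {a : List Char} (h : ∀ c ∈ a, c ≠ '\n') (b : List Char) :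
    PySem.Chars.find (a ++ '\n' :: b) nlC = (a.length : Int) := by
  set f := PySem.Chars.find (a ++ '\n' :: b) nlC with hf
  have hnn : 0 ≤ f := by
    rw [hf, PySem.Chars.find_nonneg_iff]
    exact ⟨a, b, by simp [nlC]⟩
  obtain ⟨hpre, hmin⟩ := PySem.Chars.find_spec hnn
  have hle : f.toNat ≤ a.length := by
    by_contra hgt
    exact hmin a.length (by omega) (by rw [List.drop_append_of_le_length le_rfl]; simp [nlC])
  have heq : f.toNat = a.length := by
    rcases Nat.lt_or_ge f.toNat a.length with hlt | hge
    · exfalso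
      have hd : List.drop f.toNat (a ++ '\n' :: b) =
          a[f.toNat] :: (List.drop (f.toNat + 1) a ++ '\n' :: b) := by
        rw [List.drop_append_of_le_length (by omega), List.drop_eq_getElem_cons (by omega)]
        rfl
      rw [hd] at hpre
      have h2 : '\n' = a[f.toNat] := by simpa [nlC] using hpre
      exact h _ (List.getElem_mem _) h2.symm
    · omega
  omega

lemma findFrom_of_gt_len {s sub : List Char} {start : Int} (h0 : 0 ≤ start)
    (h : (s.length : Int) < start) : PySem.Chars.findFrom s sub start none = -1 := by
  unfold PySem.Chars.findFrom
  simp only [if_neg (by omega : ¬ start < 0)]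
  rw [if_pos h]

lemma findFrom_neg_one {s sub : List Char} {start : Int} (h0 : 0 ≤ start) (hsub : sub ≠ [])
    (h : PySem.Chars.findFrom s sub start none = -1) :
    ∀ q : Nat, start ≤ (q : Int) → ¬ sub <+: s.drop q := by
  intro q hq hpre
  by_cases hqlen : s.length ≤ q
  · rw [List.drop_eq_nil_of_le hqlen, List.prefix_nil] at hpre
    exact hsub hpre
  · have hle : start ≤ (s.length : Int) := by omega
    have hst : start = ((start.toNat : Nat) : Int) := by omega
    rw [hst] at h
    rw [PySem.Chars.findFrom_natCast_eq_neg_one_iff s sub start.toNat (by omega)] at h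
    apply h
    obtain ⟨t, ht⟩ := hpre
    refine ⟨List.take (q - start.toNat) (List.drop start.toNat s), t, ?_⟩
    have hdd : List.drop q s = List.drop (q - start.toNat) (List.drop start.toNat s) := by
      rw [List.drop_drop]; congr 1; omega
    rw [List.append_assoc, ht, hdd, List.take_append_drop]

lemma findFrom_pos {s sub : List Char} {start : Int} (h0 : 0 ≤ start) (hsub : sub ≠ [])
    (h : PySem.Chars.findFrom s sub start none ≠ -1) :
    ∃ p : Nat, PySem.Chars.findFrom s sub start none = (p : Int) ∧ start ≤ (p : Int) ∧
      p < s.length ∧ sub <+: s.drop p ∧ ∀ i : Nat, start ≤ (i : Int) → i < p → ¬ sub <+: s.drop i := by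
  rcases le_or_gt start (s.length : Int) with hle | hgt
  · have hst : start = ((start.toNat : Nat) : Int) := by omega
    rw [hst] at h ⊢
    obtain ⟨h1, h2, h3⟩ := PySem.Chars.findFrom_natCast_spec s sub start.toNat (by omega) h
    set r := PySem.Chars.findFrom s sub (start.toNat : Int) none with hr
    refine ⟨r.toNat, by omega, by omega, ?_, h2, ?_⟩
    · by_contra hge
      rw [List.drop_eq_nil_of_le (by omega), List.prefix_nil] at h2
      exact hsub h2
    · intro i hi1 hi2
      exact h3 i (by omega) (by omega)
  · exact absurd (findFrom_of_gt_len h0 hgt) h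

lemma head_line_prefix_iff {x sub : List Char} (hsub : ∀ c ∈ sub, c ≠ '\n')
    {ℓ : List Char} {L : List (List Char)} (hL : linesRec x = ℓ :: L) :
    sub <+: x ↔ sub <+: ℓ := by
  rw [prefix_takeWhile_iff hsub, ← head_linesRec, hL]
  simp

-- advancing to the newline that terminates the first line of `s.drop k`

lemma nextNl {s : List Char} {k : Nat} (hk : k ≤ s.length) {ℓ : List Char} {L : List (List Char)}
    (hL : linesRec (s.drop k) = ℓ :: L) :
    (L = [] ∧ s.drop k = ℓ ∧ PySem.Chars.findFrom s nlC (k : Int) none = -1) ∨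
    (L ≠ [] ∧ PySem.Chars.findFrom s nlC (k : Int) none = ((k + ℓ.length : Nat) : Int) ∧
      k + ℓ.length < s.length ∧ s[k + ℓ.length]? = some '\n' ∧
      linesRec (s.drop (k + ℓ.length + 1)) = L) := by
  have hfree : ∀ c ∈ ℓ, c ≠ '\n' :=
    mem_linesRec_no_nl (by rw [hL]; exact List.mem_cons_self ..)
  have hx : PySem.Chars.join nlC (linesRec (s.drop k)) = s.drop k := join_linesRec _
  cases L with
  | nil =>
    left
    have hdk : s.drop k = ℓ := by
      rw [← hx, hL, PySem.Chars.join_singleton]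
    refine ⟨rfl, hdk, ?_⟩
    rw [PySem.Chars.findFrom_natCast s nlC k hk, hdk, find_nl_of_no_nl hfree]
    simp
  | cons z zs =>
    right
    have hdk : s.drop k = ℓ ++ '\n' :: PySem.Chars.join nlC (z :: zs) := by
      rw [← hx, hL, PySem.Chars.join_cons_cons]
      simp [nlC]
    set rest := PySem.Chars.join nlC (z :: zs) with hrest
    have hfind : PySem.Chars.find (s.drop k) nlC = (ℓ.length : Int) := by
      rw [hdk]; exact find_nl_append hfree _
    have hlen : (s.drop k).length = ℓ.length + 1 + rest.length := by rw [hdk]; simp; omega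
    have hklen : k + ℓ.length < s.length := by
      have := List.length_drop (i := k) (l := s); omega
    refine ⟨by simp, ?_, hklen, ?_, ?_⟩
    · rw [PySem.Chars.findFrom_natCast s nlC k hk, hfind]
      simp only [if_neg (by omega : ¬ (ℓ.length : Int) = -1)]
      push_cast; ring
    · rw [show k + ℓ.length = k + ℓ.length from rfl, ← List.getElem?_drop, hdk]
      rw [List.getElem?_append_right (by simp)]
      simp
    · have hdrop : s.drop (k + ℓ.length + 1) = rest := by
        rw [show k + ℓ.length + 1 = k + (ℓ.length + 1) from by omega, ← List.drop_drop, hdk]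
        rw [show ℓ.length + 1 = (ℓ ++ ['\n']).length from by simp]
        rw [show ℓ ++ '\n' :: rest = (ℓ ++ ['\n']) ++ rest from by simp]
        rw [List.drop_left]
      have h2 : linesRec (s.drop k) = linesRec ℓ ++ linesRec rest := by
        rw [hdk, linesRec_append_nl]
      rw [hL, linesRec_of_no_nl hfree] at h2
      simp only [List.singleton_append, List.cons.injEq] at h2
      rw [hdrop, ← h2.2]

lemma bExtend_neg_one (s : List Char) (fuel : Nat) : bExtend s fuel (-1) = -1 := by
  cases fuel <;> simp [bExtend]

lemma cmt_free : ∀ c ∈ cmtC, c ≠ '\n' := by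
  have h : cmtC.all (fun c => c != '\n') = true := rfl
  rw [List.all_eq_true] at h
  intro c hc
  simpa using h c hc

lemma mark_free : ∀ c ∈ markC, c ≠ '\n' := by
  have h : markC.all (fun c => c != '\n') = true := rfl
  rw [List.all_eq_true] at h
  intro c hc
  simpa using h c hc

lemma mark_ne : markC ≠ [] := by
  have h : markC.length = 24 := rfl
  intro hx
  rw [hx] at h
  simp at h

lemma bExtend_guard (s : List Char) (fuel e : Nat) :
    bExtend s (fuel + 1) (e : Int) =
      if cmtC.isPrefixOf (s.drop (e + 1)) then bExtend s fuel (PySem.Chars.findFrom s nlC ((e : Int) + 1) none)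
      else (e : Int) := by
  rw [show bExtend s (fuel + 1) (e : Int) =
    (if (e : Int) ≠ -1 ∧ PySem.Chars.startswith (PySem.List.slice s (some ((e : Int) + 1)) none) cmtC then
      bExtend s fuel (PySem.Chars.findFrom s nlC ((e : Int) + 1) none)
    else (e : Int)) from rfl]
  have h1 : ((e : Int) + 1) = ((e + 1 : Nat) : Int) := by push_cast; ring
  have h2 : PySem.List.slice s (some ((e : Int) + 1)) none = s.drop (e + 1) := by
    rw [h1, PySem.List.slice_from_natCast]
  rw [h2]
  by_cases hc : cmtC.isPrefixOf (s.drop (e + 1))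
  · rw [if_pos hc, if_pos ⟨by omega, by simpa [PySem.Chars.startswith] using hc⟩]
  · rw [if_neg hc, if_neg]
    intro ⟨_, hx⟩
    exact hc (by simpa [PySem.Chars.startswith] using hx)

lemma bExtend_spec (s : List Char) : ∀ (ls : List (List Char)) (fuel e : Nat),
    linesRec (s.drop (e+1)) = ls → e < s.length → s[e]? = some '\n' → ls.length < fuel →
    ((∀ l ∈ ls, cmtC <+: l) ∧ bExtend s fuel (e : Int) = -1) ∨
    (∃ r : Nat, bExtend s fuel (e : Int) = (r : Int) ∧ e ≤ r ∧ r < s.length ∧ s[r]? = some '\n' ∧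
      linesRec (s.drop (r+1)) = ls.dropWhile (fun l => cmtC.isPrefixOf l) ∧
      ls.dropWhile (fun l => cmtC.isPrefixOf l) ≠ []) := by
  intro ls
  induction ls with
  | nil => intro fuel e hL _ _ _; exact absurd hL (linesRec_ne_nil _)
  | cons ℓ ls' ih =>
    intro fuel e hL helen henl hfuel
    cases fuel with
    | zero => exact absurd hfuel (by omega)
    | succ f =>
      rw [bExtend_guard]
      have hiff : cmtC.isPrefixOf (s.drop (e + 1)) = true ↔ cmtC <+: ℓ := by
        rw [List.isPrefixOf_iff_prefix]
        exact head_line_prefix_iff cmt_free hL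
      by_cases hcl : cmtC <+: ℓ
      · rw [if_pos (hiff.mpr hcl)]
        rcases nextNl (k := e + 1) (by omega) hL with ⟨hnil, hdk, hfo⟩ | ⟨hne, hfo, hlt, hnl, hL2⟩
        · subst hnil
          rw [show ((e : Int) + 1) = ((e + 1 : Nat) : Int) from by push_cast; ring, hfo,
            bExtend_neg_one]
          exact Or.inl ⟨by simpa using hcl, rfl⟩
        · rw [show ((e : Int) + 1) = ((e + 1 : Nat) : Int) from by push_cast; ring, hfo]
          rcases ih f (e + 1 + ℓ.length) hL2 (by omega) hnl
              (by simp only [List.length_cons] at hfuel; omega) with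
            ⟨hall, hbe⟩ | ⟨r, hbe, hr1, hr2, hr3, hr4, hr5⟩
          · refine Or.inl ⟨?_, hbe⟩
            intro l hl
            rcases List.mem_cons.mp hl with rfl | hl'
            · exact hcl
            · exact hall l hl'
          · have hposd : (fun l => cmtC.isPrefixOf l) ℓ = true := by
              simpa using List.isPrefixOf_iff_prefix.mpr hcl
            refine Or.inr ⟨r, hbe, by omega, hr2, hr3, ?_, ?_⟩
            · rw [hr4, List.dropWhile_cons_of_pos hposd]
            · rw [List.dropWhile_cons_of_pos hposd]
              exact hr5
      · have hnegd : ¬ (fun l => cmtC.isPrefixOf l) ℓ = true := by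
          exact fun hx => hcl (List.isPrefixOf_iff_prefix.mp (by simpa using hx))
        rw [if_neg (by rw [hiff]; exact hcl)]
        refine Or.inr ⟨e, rfl, le_rfl, helen, henl, ?_, ?_⟩
        · rw [List.dropWhile_cons_of_neg hnegd]
          exact hL
        · simp [List.dropWhile_cons_of_neg hnegd]

lemma linesRec_length_le (x : List Char) : (linesRec x).length ≤ x.length + 1 := by
  induction x with
  | nil => simp [linesRec]
  | cons c t ih =>
    obtain ⟨y, ys, h⟩ := List.exists_cons_of_ne_nil (linesRec_ne_nil t)
    by_cases hc : c = '\n'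
    · subst hc
      rw [show linesRec ('\n'::t) = [] :: linesRec t from by simp [linesRec]]
      simp at ih ⊢
      omega
    · rw [show linesRec (c::t) = (c :: (linesRec t).headD []) :: (linesRec t).tail from by
        simp [linesRec, hc]]
      rw [h] at ih ⊢
      simp at ih ⊢
      omega

lemma prefix_of_prefix_append {a b x : List Char} (h : x <+: a ++ b) (hlen : x.length ≤ a.length) :
    x <+: a := by
  obtain ⟨t, ht⟩ := h
  have hx : x = (a ++ b).take x.length := by rw [← ht, List.take_left]
  rw [List.take_append_of_le_length hlen] at hx
  exact hx ▸ List.take_prefix _ _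

lemma hdrAt_take {s : List Char} {m q : Nat} (h : hdrAt (s.take m) q) : hdrAt s q := by
  obtain ⟨h1, h2⟩ := h
  refine ⟨?_, ?_⟩
  · rw [List.drop_take] at h1
    exact h1.trans (List.take_prefix _ _)
  · rcases h2 with h2 | h2
    · exact Or.inl h2
    · right
      obtain ⟨hlt, _⟩ := List.getElem?_eq_some_iff.mp h2
      have hqm : q - 1 < m := by
        have h3 := hlt
        simp [List.length_take] at h3
        omega
      rwa [List.getElem?_take, if_pos hqm] at h2

lemma hdrAt_splice {s X : List Char} {p q : Nat} (hp : p ≤ s.length) (hq : q < p)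
    (hnl : s[p-1]? = some '\n') (h : hdrAt (s.take p ++ X) q) : hdrAt s q := by
  have hlenTake : (s.take p).length = p := by simp [hp]
  obtain ⟨h1, h2⟩ := h
  obtain ⟨tl, htl⟩ := h1
  have hgetm : ∀ i, i < markC.length → (s.take p ++ X)[q+i]? = markC[i]? := by
    intro i hi
    rw [← List.getElem?_drop, ← htl, List.getElem?_append_left hi]
  have hsp : (s.take p ++ X)[p-1]? = some '\n' := by
    rw [List.getElem?_append_left (by omega : p - 1 < (s.take p).length),
      List.getElem?_take, if_pos (by omega : p - 1 < p)]
    exact hnl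
  have hq24 : q + markC.length ≤ p := by
    by_contra hgt
    have hi : p - 1 - q < markC.length := by omega
    have hx := hgetm (p-1-q) hi
    rw [show q + (p-1-q) = p - 1 from by omega, hsp] at hx
    exact mark_free '\n' (List.mem_of_getElem? hx.symm) rfl
  refine ⟨?_, ?_⟩
  · have hdq : List.drop q (s.take p ++ X) = List.drop q (s.take p) ++ X :=
      List.drop_append_of_le_length (by omega)
    have hpre : markC <+: List.drop q (s.take p) ++ X := hdq ▸ ⟨tl, htl⟩
    have hA : markC <+: List.drop q (s.take p) :=
      prefix_of_prefix_append hpre (by simp [List.length_drop, hlenTake]; omega)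
    rw [List.drop_take] at hA
    exact hA.trans (List.take_prefix _ _)
  · rcases h2 with h2 | h2
    · exact Or.inl h2
    · right
      rwa [List.getElem?_append_left (by omega : q - 1 < (s.take p).length),
        List.getElem?_take, if_pos (by omega : q - 1 < p)] at h2

lemma dropWhile_head_not {α : Type} (pred : α → Bool) :
    ∀ (L : List α) {w : α} {vs : List α}, L.dropWhile pred = w :: vs → pred w = false := by
  intro L
  induction L with
  | nil => intro w vs h; simp at h
  | cons a L ih =>
    intro w vs h
    by_cases hp : pred a = true
    · rw [List.dropWhile_cons_of_pos hp] at h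
      exact ih h
    · rw [List.dropWhile_cons_of_neg hp] at h
      injection h with h1 _
      subst h1
      exact Bool.eq_false_iff.mpr hp

lemma asem_nil : asem [] = [] := by
  rw [asem, show linesRec [] = [[]] from rfl,
    show stripL false [[]] = [[]] from by simp [stripL, show markC.isPrefixOf ([] : List Char) = false from rfl],
    PySem.Chars.join_singleton]

lemma bLoop_succ (s : List Char) (f : Nat) (pos : Int) :
    bLoop s (f+1) pos =
      (if PySem.Chars.findFrom s markC pos none = -1 then s
       else if 0 < PySem.Chars.findFrom s markC pos none ∧
           PySem.List.pyGetD s (PySem.Chars.findFrom s markC pos none - 1) ' ' ≠ '\n' then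
         bLoop s f (PySem.Chars.findFrom s markC pos none + 1)
       else if bExtend s (s.length + 1)
           (PySem.Chars.findFrom s nlC (PySem.Chars.findFrom s markC pos none) none) = -1 then
         bLoop (PySem.List.slice s none (some (max (PySem.Chars.findFrom s markC pos none - 1) 0))) f
           (PySem.Chars.findFrom s markC pos none)
       else
         bLoop (PySem.List.slice s none (some (PySem.Chars.findFrom s markC pos none)) ++
             PySem.List.slice s (some (bExtend s (s.length + 1)
               (PySem.Chars.findFrom s nlC (PySem.Chars.findFrom s markC pos none) none) + 1)) none) f
           (PySem.Chars.findFrom s markC pos none)) := rfl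

def InvB (s : List Char) (pos : Int) : Prop := ∀ q : Nat, (q : Int) < pos → ¬ hdrAt s q

lemma bLoop_eq : ∀ (fuel : Nat) (s : List Char) (pos : Int), 0 ≤ pos →
    s.length + 1 - min pos.toNat s.length ≤ fuel → InvB s pos → bLoop s fuel pos = asem s := by
  intro fuel
  induction fuel with
  | zero =>
    intro s pos h0 hμ hInv
    omega
  | succ f ih =>
    intro s pos h0 hμ hInv
    rw [bLoop_succ]
    by_cases hP : PySem.Chars.findFrom s markC pos none = -1
    · rw [if_pos hP]
      have hnohdr : ∀ l ∈ linesRec s, ¬ markC <+: l := by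
        intro l hl hml
        obtain ⟨q, hq⟩ := hdr_of_mem hl hml
        rcases lt_or_ge (q : Int) pos with hlt | hge
        · exact hInv q hlt hq
        · exact findFrom_neg_one h0 mark_ne hP q hge hq.1
      rw [show asem s = s from by rw [asem, stripL_id hnohdr, join_linesRec]]
    · obtain ⟨p, hPp, hppos, hplen, hppre, hpmin⟩ := findFrom_pos h0 mark_ne hP
      rw [hPp, if_neg (by omega : ¬ ((p:Int) = -1))]
      by_cases hskip : 0 < (p:Int) ∧ PySem.List.pyGetD s ((p:Int) - 1) ' ' ≠ '\n'
      · rw [if_pos hskip]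
        apply ih s ((p:Int) + 1) (by omega)
        · have h1 : ((p:Int) + 1).toNat = p + 1 := by omega
          rw [h1]
          have h2 : pos.toNat ≤ p := by omega
          omega
        · intro q hq hdr
          rcases lt_or_ge (q : Int) pos with h | h
          · exact hInv q h hdr
          · rcases Nat.lt_or_ge q p with hq2 | hq2
            · exact hpmin q h hq2 hdr.1
            · have hqp : q = p := by omega
              subst hqp
              rcases hdr.2 with h2 | h2
              · omega
              · apply hskip.2
                have hp1 : ((q:Int) - 1) = ((q - 1 : Nat) : Int) := by omega
                rw [hp1, PySem.List.pyGetD_natCast, List.getD_eq_getElem?_getD, h2]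
                rfl
      · rw [if_neg hskip]
        have hstart : p = 0 ∨ s[p-1]? = some '\n' := by
          by_cases hp0 : p = 0
          · exact Or.inl hp0
          · right
            have h2 : PySem.List.pyGetD s ((p:Int) - 1) ' ' = '\n' := by
              by_contra hx
              exact hskip ⟨by omega, hx⟩
            have hp1 : ((p:Int) - 1) = ((p - 1 : Nat) : Int) := by omega
            rw [hp1, PySem.List.pyGetD_natCast, List.getD_eq_getElem?_getD] at h2
            have hlt : p - 1 < s.length := by omega
            rw [List.getElem?_eq_getElem hlt] at h2 ⊢
            simp at h2 ⊢
            exact h2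
        obtain ⟨ℓ₀, rest, hL⟩ : ∃ a L, linesRec (s.drop p) = a :: L := by
          obtain ⟨y, ys, h⟩ := List.exists_cons_of_ne_nil (linesRec_ne_nil (s.drop p))
          exact ⟨y, ys, h⟩
        have hmark0 : markC <+: ℓ₀ := (head_line_prefix_iff mark_free hL).mp hppre
        have hnoq : ∀ q : Nat, q < p → ¬ hdrAt s q := by
          intro q hq hdr
          rcases lt_or_ge (q : Int) pos with h | h
          · exact hInv q h hdr
          · exact hpmin q h hq hdr.1
        -- the "block reaches the end of the string" splice
        have hend : (∀ l ∈ rest, cmtC <+: l) →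
            bLoop (PySem.List.slice s none (some (max ((p:Int) - 1) 0))) f (p:Int) = asem s := by
          intro hall
          have hslice : PySem.List.slice s none (some (max ((p:Int) - 1) 0)) = s.take (p-1) := by
            rw [show max ((p:Int) - 1) 0 = ((p - 1 : Nat) : Int) from by omega,
              PySem.List.slice_to_natCast]
          rw [hslice]
          by_cases hp0 : p = 0
          · subst hp0
            rw [show s.take (0-1) = [] from by simp]
            have hs0 : linesRec s = ℓ₀ :: rest := by simpa using hL
            have hstrip : stripL false (linesRec s) = [] := by
              have hb := stripL_block hmark0 hall (Or.inl rfl) [] false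
              simp only [List.nil_append, List.append_nil] at hb
              rw [hs0, hb]
              rfl
            rw [ih [] ((0:Nat):Int) (by omega) (by simp; omega) (by intro q hq hdr; omega)]
            rw [asem_nil, asem, hstrip, PySem.Chars.join_nil]
          · have hnlp : s[p-1]? = some '\n' := by
              rcases hstart with h | h
              · omega
              · exact h
            have hdrop1 : s.drop (p-1) = '\n' :: s.drop p := by
              rw [List.drop_eq_getElem_cons (show p-1 < s.length from by omega)]
              obtain ⟨hh, hv⟩ := List.getElem?_eq_some_iff.mp hnlp
              rw [hv, show p-1+1 = p from by omega]
            have hsplit : s = s.take (p-1) ++ '\n' :: s.drop p := by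
              conv_lhs => rw [← List.take_append_drop (p-1) s]
              rw [hdrop1]
            have hlines : linesRec s = linesRec (s.take (p-1)) ++ (ℓ₀ :: rest) := by
              conv_lhs => rw [hsplit]
              rw [linesRec_append_nl, hL]
            have hstrip : stripL false (linesRec s) = stripL false (linesRec (s.take (p-1))) := by
              have hb := stripL_block hmark0 hall (Or.inl rfl) (linesRec (s.take (p-1))) false
              simp only [List.append_nil] at hb
              rw [hlines, hb]
            rw [ih (s.take (p-1)) (p:Int) (by omega) ?_ ?_]
            · rw [asem, asem, hstrip]
            · have hl1 : (s.take (p-1)).length = p - 1 := by simp; omega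
              have h2 : ((p:Int)).toNat = p := by omega
              rw [hl1, h2]
              have h3 : pos.toNat ≤ p := by omega
              omega
            · intro q hq hdr
              exact hnoq q (by omega) (hdrAt_take hdr)
        rcases nextNl (k := p) (le_of_lt hplen) hL with ⟨hnil, hdk, hfo⟩ | ⟨hne, hfo, hlt2, hnl2, hL2⟩
        · rw [hfo, bExtend_neg_one, if_pos rfl]
          exact hend (by rw [hnil]; intro l hl; simp at hl)
        · rw [hfo]
          have hfuelB : rest.length < s.length + 1 := by
            have h1 := linesRec_length_le (s.drop (p + ℓ₀.length + 1))
            rw [hL2] at h1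
            have h2 := List.length_drop (i := p + ℓ₀.length + 1) (l := s)
            omega
          rcases bExtend_spec s rest (s.length+1) (p + ℓ₀.length) hL2 hlt2 hnl2 hfuelB with
            ⟨hall, hbe⟩ | ⟨r, hbe, hr1, hr2, hr3, hr4, hr5⟩
          · rw [hbe, if_pos rfl]
            exact hend hall
          · rw [hbe, if_neg (by omega : ¬ ((r:Int) = -1))]
            have hslices : PySem.List.slice s none (some ((p:Int))) ++
                PySem.List.slice s (some ((r:Int) + 1)) none = s.take p ++ s.drop (r+1) := by
              rw [PySem.List.slice_to_natCast,
                show ((r:Int) + 1) = ((r + 1 : Nat) : Int) from by push_cast; ring,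
                PySem.List.slice_from_natCast]
            rw [hslices]
            have hcs : ∀ c ∈ rest.takeWhile (fun l => cmtC.isPrefixOf l), cmtC <+: c := by
              intro c hc
              exact List.isPrefixOf_iff_prefix.mp (List.mem_takeWhile_imp hc)
            have hv : rest.dropWhile (fun l => cmtC.isPrefixOf l) = [] ∨
                ∃ w vs, rest.dropWhile (fun l => cmtC.isPrefixOf l) = w :: vs ∧ ¬ cmtC <+: w := by
              cases hv0 : rest.dropWhile (fun l => cmtC.isPrefixOf l) with
              | nil => exact Or.inl rfl
              | cons w vs =>
                refine Or.inr ⟨w, vs, rfl, fun hx => ?_⟩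
                have hw := dropWhile_head_not (fun l => cmtC.isPrefixOf l) rest hv0
                simp only at hw
                rw [List.isPrefixOf_iff_prefix.mpr hx] at hw
                exact Bool.true_eq_false ▸ hw ▸ rfl
            have hrest_decomp : rest = rest.takeWhile (fun l => cmtC.isPrefixOf l) ++
                rest.dropWhile (fun l => cmtC.isPrefixOf l) :=
              (List.takeWhile_append_dropWhile ..).symm
            by_cases hp0 : p = 0
            · subst hp0
              rw [show s.take 0 = [] from rfl, List.nil_append]
              have hs0 : linesRec s = ℓ₀ :: rest := by simpa using hL
              have hstrip : stripL false (linesRec s) =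
                  stripL false (rest.dropWhile (fun l => cmtC.isPrefixOf l)) := by
                have hb := stripL_block hmark0 hcs hv [] false
                simp only [List.nil_append] at hb
                rw [hs0]
                conv_lhs => rw [hrest_decomp]
                exact hb
              rw [ih (s.drop (r+1)) ((0:Nat):Int) (by omega) (by
                  have h2 := List.length_drop (i := r+1) (l := s)
                  simp
                  omega) (by intro q hq hdr; omega)]
              rw [asem, asem, hr4, hstrip]
            · have hnlp : s[p-1]? = some '\n' := by
                rcases hstart with h | h
                · omega
                · exact h
              have hdrop1 : s.drop (p-1) = '\n' :: s.drop p := by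
                rw [List.drop_eq_getElem_cons (show p-1 < s.length from by omega)]
                obtain ⟨hh, hv'⟩ := List.getElem?_eq_some_iff.mp hnlp
                rw [hv', show p-1+1 = p from by omega]
              have hsplit : s = s.take (p-1) ++ '\n' :: s.drop p := by
                conv_lhs => rw [← List.take_append_drop (p-1) s]
                rw [hdrop1]
              have htakep : s.take p = s.take (p-1) ++ ['\n'] := by
                have h5 : s.take ((p-1)+1) = s.take (p-1) ++ ['\n'] := by
                  rw [List.take_succ_eq_append_getElem (show p-1 < s.length from by omega)]
                  obtain ⟨_, hv'⟩ := List.getElem?_eq_some_iff.mp hnlp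
                  rw [hv']
                rwa [show (p-1)+1 = p from by omega] at h5
              have hlines : linesRec s = linesRec (s.take (p-1)) ++ (ℓ₀ :: rest) := by
                conv_lhs => rw [hsplit]
                rw [linesRec_append_nl, hL]
              have hlines' : linesRec (s.take p ++ s.drop (r+1)) =
                  linesRec (s.take (p-1)) ++ rest.dropWhile (fun l => cmtC.isPrefixOf l) := by
                rw [htakep, List.append_assoc, List.singleton_append, linesRec_append_nl, hr4]
              have hstrip : stripL false (linesRec s) =
                  stripL false (linesRec (s.take p ++ s.drop (r+1))) := by
                have hb := stripL_block hmark0 hcs hv (linesRec (s.take (p-1))) false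
                rw [hlines, hlines']
                conv_lhs => rw [hrest_decomp]
                rw [show linesRec (s.take (p-1)) ++ (ℓ₀ :: (rest.takeWhile (fun l => cmtC.isPrefixOf l) ++ rest.dropWhile (fun l => cmtC.isPrefixOf l))) = linesRec (s.take (p-1)) ++ (ℓ₀ :: rest.takeWhile (fun l => cmtC.isPrefixOf l)) ++ rest.dropWhile (fun l => cmtC.isPrefixOf l) from by simp]
                exact hb
              rw [ih (s.take p ++ s.drop (r+1)) (p:Int) (by omega) ?_ ?_]
              · rw [asem, asem, hstrip]
              · have hl1 : (s.take p).length = p := by simp; omega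
                have h2 := List.length_drop (i := r+1) (l := s)
                have h3 : ((p:Int)).toNat = p := by omega
                rw [List.length_append, hl1, h3]
                have h4 : pos.toNat ≤ p := by omega
                omega
              · intro q hq hdr
                have hq' : q < p := by omega
                exact hnoq q hq' (hdrAt_splice (le_of_lt hplen) hq' hnlp hdr)

-- ===== VERDICT (by name: the statement is the Claim_ definition above) =====
theorem strip_auto_gen_header_spec : Claim_equal_strip_auto_gen_header := by
  intro content _
  unfold Spec_strip_auto_gen_header
  rw [portA_eq_asem,
    show strip_auto_gen_header_alt content =
      String.ofList (bLoop content.toList (content.toList.length + 1) 0) from rfl,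
    bLoop_eq (content.toList.length + 1) content.toList 0 le_rfl (by simp)
      (by intro q hq hdr; omega)]
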